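-- pv_equiv track=rewrite | github.com/johnynek/bosatsu | pyout/Bosatsu/Nat.py | from_to_law
-- ===== SOURCE A (Python) =====
-- def to_Int(___bn10):
--     def ___bloop7(___bacc3, ___bn11):
--         ___a80 = ___bacc3
--         ___a82 = ___bn11
--         ___a77 = 1
--         ___t13 = ___a77 == 1
--         while ___t13:
--             if ___a82 == 0:
--                 ___a77 = 0
--                 ___a78 = ___a80
--             else:
--                 ___a76 = ___a82 - 1
--                 ___bn12 = ___a76
--                 ___a79 = ___a80 + 1
--                 ___a81 = ___bn12
--                 ___a80 = ___a79
--                 ___a82 = ___a81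
--             ___t13 = ___a77 == 1
--         return ___a78
--     return ___bloop7(0, ___bn10)
--
-- def from_to_law(___bi2, ___bmessage0):
--     ___t21 = 0 < ___bi2
--     ___t22 = 0
--     ___t23 = ___bi2
--     ___t24 = 0
--     while ___t21:
--         ___t25 = ___t23 + -1
--         ___t24 = ___t24 + 1
--         ___t21 = (0 < ___t25) and (___t25 < ___t23)
--         ___t23 = ___t25
--     return (0, to_Int(___t24) == ___bi2, ___bmessage0)
-- ===== SOURCE B (Python) =====
-- def from_to_law(___bi2, ___bmessage0):
--     # closed form: the count-down loop counts to i for i>0 and to_Int inverts it,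
--     # so the round trip holds exactly when i >= 0
--     return (0, ___bi2 >= 0, ___bmessage0)
-- ===== Notes on version B (the rewrite author's own statement) =====
-- stated objective: faster
-- what changed: replaces the count-down loop plus the to_Int counting loop by the closed form (0, i >= 0, message)
import Mathlib
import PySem

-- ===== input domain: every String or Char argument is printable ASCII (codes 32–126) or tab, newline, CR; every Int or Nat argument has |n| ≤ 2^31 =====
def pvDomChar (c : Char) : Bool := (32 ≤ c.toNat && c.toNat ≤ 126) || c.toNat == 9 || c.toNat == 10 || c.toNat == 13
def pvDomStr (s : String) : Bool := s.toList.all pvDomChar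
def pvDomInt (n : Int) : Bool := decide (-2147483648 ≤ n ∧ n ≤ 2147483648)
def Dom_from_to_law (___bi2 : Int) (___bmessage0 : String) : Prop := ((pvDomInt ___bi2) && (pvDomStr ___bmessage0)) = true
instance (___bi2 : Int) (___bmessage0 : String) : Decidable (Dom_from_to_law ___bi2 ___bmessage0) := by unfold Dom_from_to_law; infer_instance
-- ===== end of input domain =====

-- B replaces A's two counting loops by the closed form (0, i >= 0, message): asymptotically faster (O(1) vs O(i)).

-- ===== PORT A =====
-- loop of to_Int: state (a80 = acc, a82 = n); the else-guard for a82 < 0 only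
-- makes the function total (Python diverges there); it is never reached on the
-- argument A passes (a nonnegative counter).
def toIntLoopA (a80 a82 : Int) : Int :=
  if a82 = 0 then a80
  else if a82 < 0 then a80   -- Python diverges here; unreachable in A's call
  else toIntLoopA (a80 + 1) (a82 - 1)
termination_by a82.toNat
decreasing_by
  rename_i h1 h2
  omega

def to_Int (___bn10 : Int) : Int := toIntLoopA 0 ___bn10

-- the while loop of from_to_law: state (t21 = flag, t23, t24)
def ftlLoopA (t21 : Bool) (t23 t24 : Int) : Int :=
  if t21 then
    let t25 := t23 + (-1)
    ftlLoopA (decide (0 < t25 ∧ t25 < t23)) t25 (t24 + 1)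
  else t24
termination_by t23.toNat + (if t21 then 1 else 0)
decreasing_by
  simp only [decide_eq_true_eq]
  split <;> omega

def from_to_law (___bi2 : Int) (___bmessage0 : String) : Int × Bool × String :=
  let t24 := ftlLoopA (decide (0 < ___bi2)) ___bi2 0
  (0, decide (to_Int t24 = ___bi2), ___bmessage0)

-- ===== PORT B =====
def from_to_law_alt (___bi2 : Int) (___bmessage0 : String) : Int × Bool × String :=
  (0, decide (0 ≤ ___bi2), ___bmessage0)

-- ===== PRECONDITION & SPEC =====
def Spec_from_to_law (___bi2 : Int) (___bmessage0 : String) (out : Int × Bool × String) : Prop := out = from_to_law_alt ___bi2 ___bmessage0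
instance (___bi2 : Int) (___bmessage0 : String) (out : Int × Bool × String) : Decidable (Spec_from_to_law ___bi2 ___bmessage0 out) := by unfold Spec_from_to_law; infer_instance

-- ===== CLAIM (what is proved, stated in full; the proofs are below) =====
def Claim_equal_from_to_law : Prop := ∀ (___bi2 : Int) (___bmessage0 : String), Dom_from_to_law ___bi2 ___bmessage0 → Spec_from_to_law ___bi2 ___bmessage0 (from_to_law ___bi2 ___bmessage0)

-- ===== LEMMAS AND PROOFS =====

theorem toIntLoopA_nonneg (n : Nat) : ∀ (acc : Int), toIntLoopA acc (n : Int) = acc + n := by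
  induction n with
  | zero => intro acc; simp [toIntLoopA]
  | succ k ih =>
      intro acc
      rw [toIntLoopA]
      have h0 : ¬ ((k + 1 : Nat) : Int) = 0 := by omega
      have h1 : ¬ ((k + 1 : Nat) : Int) < 0 := by omega
      rw [if_neg h0, if_neg h1]
      have : ((k + 1 : Nat) : Int) - 1 = (k : Int) := by omega
      rw [this, ih]
      omega

theorem ftlLoopA_count (n : Nat) : ∀ (t24 : Int), ftlLoopA (decide (0 < (n : Int))) (n : Int) t24 = t24 + n := by
  induction n with
  | zero => intro t24; simp [ftlLoopA]
  | succ k ih =>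
      intro t24
      rw [ftlLoopA]
      have hpos : (0 < ((k + 1 : Nat) : Int)) := by omega
      rw [if_pos (by simp)]
      simp only []
      have h25 : ((k + 1 : Nat) : Int) + (-1) = (k : Int) := by omega
      have hcond : decide (0 < ((k + 1 : Nat) : Int) + (-1) ∧ ((k + 1 : Nat) : Int) + (-1) < ((k + 1 : Nat) : Int)) = decide (0 < (k : Int)) := by
        rw [h25]; simp
      rw [hcond, h25, ih]
      omega

-- ===== VERDICT (by name: the statement is the Claim_ definition above) =====
theorem from_to_law_spec : Claim_equal_from_to_law := by
  intro i msg _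
  unfold Spec_from_to_law from_to_law from_to_law_alt
  by_cases h : 0 ≤ i
  · obtain ⟨n, rfl⟩ := Int.eq_ofNat_of_zero_le h
    rw [ftlLoopA_count n 0]
    simp only [zero_add, to_Int]
    rw [toIntLoopA_nonneg n 0]
    simp
  · have hne : ¬ (0 < i) := by omega
    rw [show (decide (0 < i)) = false by simpa using hne]
    rw [ftlLoopA]
    simp only [if_neg (by simp : ¬ (false = true))]
    simp [to_Int, toIntLoopA]
    omega
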